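-- pv_equiv track=rewrite | github.com/WillyKess/AP-Java | Unit2Project4/unit2project4/main.py | homothety_square
-- ===== SOURCE A (Python) =====
-- def homothety_square(square, k):
--     new_square = []
--     for i in range(len(square)):
--         temp_arr = []
--         for j in range(len(square)):
--             for _ in range(k):
--                 temp_arr.append(square[i][j])
--         for _ in range(k):
--             new_square.append(temp_arr)
--     return new_square
-- ===== SOURCE B (Python) =====
-- def homothety_square(square, k):
--     n = len(square)
--     return [[square[i // k][j // k] for j in range(n * k)] for i in range(n * k)]
-- ===== Notes on version B (the rewrite author's own statement) =====
-- stated objective: simpler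
-- what changed: B computes each output cell directly by the index map (i,j) -> square[i//k][j//k] over range(n*k) in one nested comprehension, instead of A's three nested replication-append loops (A additionally aliases each repeated row; B builds distinct, value-equal rows).
import Mathlib
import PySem

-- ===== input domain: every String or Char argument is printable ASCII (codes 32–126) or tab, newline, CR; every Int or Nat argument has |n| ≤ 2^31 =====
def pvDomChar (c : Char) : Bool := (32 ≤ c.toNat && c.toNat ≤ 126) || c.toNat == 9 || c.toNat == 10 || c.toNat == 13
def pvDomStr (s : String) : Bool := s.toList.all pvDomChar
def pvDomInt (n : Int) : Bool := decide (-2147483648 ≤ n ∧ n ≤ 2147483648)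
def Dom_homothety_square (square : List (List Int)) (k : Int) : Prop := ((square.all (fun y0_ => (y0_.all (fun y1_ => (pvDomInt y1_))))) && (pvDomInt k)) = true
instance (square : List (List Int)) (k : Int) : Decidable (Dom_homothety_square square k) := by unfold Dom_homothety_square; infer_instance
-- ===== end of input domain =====

-- B replaces A's three nested replication-append loops by a single nested comprehension that
-- computes each output cell directly via the index map (i, j) ↦ square[i//k][j//k]; simpler, same cost.

-- ===== PORT A =====
def homothety_square (square : List (List Int)) (k : Int) : List (List Int) :=
  (PySem.List.pyRange 0 (square.length : Int) 1).foldl (fun new_square i =>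
    let temp_arr := (PySem.List.pyRange 0 (square.length : Int) 1).foldl (fun temp_arr j =>
      (PySem.List.pyRange 0 k 1).foldl (fun t _ =>
        t ++ [PySem.List.pyGetD (PySem.List.pyGetD square i []) j 0]) temp_arr) []
    (PySem.List.pyRange 0 k 1).foldl (fun ns _ => ns ++ [temp_arr]) new_square) []

-- ===== PORT B =====
def homothety_square_alt (square : List (List Int)) (k : Int) : List (List Int) :=
  (PySem.List.pyRange 0 ((square.length : Int) * k) 1).map (fun i =>
    (PySem.List.pyRange 0 ((square.length : Int) * k) 1).map (fun j =>
      PySem.List.pyGetD (PySem.List.pyGetD square (PySem.Int.floordiv i k) [])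
        (PySem.Int.floordiv j k) 0))

-- ===== PRECONDITION & SPEC =====
-- Pre_ excludes exactly the inputs where the Python A raises IndexError: k ≥ 1 together with
-- a row shorter than len(square) (A indexes square[i][j] for all j < len(square) then).
def Pre_homothety_square (square : List (List Int)) (k : Int) : Prop :=
  k ≤ 0 ∨ ∀ row ∈ square, square.length ≤ row.length
instance (square : List (List Int)) (k : Int) : Decidable (Pre_homothety_square square k) := by
  unfold Pre_homothety_square; infer_instance
def pvWitness_homothety_square : List (List Int) × Int := ([[1, 2], [3, 4]], 2)

def Spec_homothety_square (square : List (List Int)) (k : Int) (out : List (List Int)) : Prop := out = homothety_square_alt square k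
instance (square : List (List Int)) (k : Int) (out : List (List Int)) : Decidable (Spec_homothety_square square k out) := by unfold Spec_homothety_square; infer_instance

-- ===== CLAIM (what is proved, stated in full; the proofs are below) =====
def Claim_equal_homothety_square : Prop := ∀ (square : List (List Int)) (k : Int), Dom_homothety_square square k → Pre_homothety_square square k → Spec_homothety_square square k (homothety_square square k)

-- ===== LEMMAS AND PROOFS =====

-- A range-of-length-(n*K) map through ⌊·/K⌋ is the blockwise replication A builds.
lemma map_floordiv_pyRange_eq_flatMap {α : Type} (K : Nat) (hK : 0 < K) (n : Nat) (f : Int → α) :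
    (PySem.List.pyRange 0 ((n : Int) * (K : Int)) 1).map
        (fun i => f (PySem.Int.floordiv i (K : Int)))
      = (PySem.List.pyRange 0 (n : Int) 1).flatMap (fun i => List.replicate K (f i)) := by
  induction n with
  | zero => simp [PySem.List.pyRange_one_eq_nil]
  | succ n ih =>
    have h1 : (0 : Int) ≤ (n : Int) * (K : Int) := by positivity
    have hsplit : PySem.List.pyRange 0 (((n + 1 : Nat) : Int) * (K : Int)) 1
        = PySem.List.pyRange 0 ((n : Int) * (K : Int)) 1
          ++ PySem.List.pyRange ((n : Int) * (K : Int)) (((n + 1 : Nat) : Int) * (K : Int)) 1 := by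
      apply PySem.List.pyRange_one_append
      · exact h1
      · push_cast; nlinarith
    have hsplit2 : PySem.List.pyRange 0 ((n : Int) + 1) 1
        = PySem.List.pyRange 0 (n : Int) 1 ++ [(n : Int)] := by
      have h := PySem.List.pyRange_one_succ_right (a := 0) (b := (n : Int)) (by positivity)
      simpa using h
    have htail : (PySem.List.pyRange ((n : Int) * (K : Int)) (((n + 1 : Nat) : Int) * (K : Int)) 1).map
        (fun i => f (PySem.Int.floordiv i (K : Int))) = List.replicate K (f (n : Int)) := by
      rw [PySem.List.pyRange_one]
      have hlen : (((n + 1 : Nat) : Int) * (K : Int)) - (n : Int) * (K : Int) = (K : Int) := by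
        push_cast; ring
      rw [hlen, Int.toNat_natCast, List.map_map]
      have hconst : ∀ t ∈ List.range K,
          ((fun i => f (PySem.Int.floordiv i (K : Int))) ∘ fun t : Nat => (n : Int) * (K : Int) + (t : Int)) t
            = (fun _ : Nat => f (n : Int)) t := by
        intro t ht
        simp only [Function.comp_apply]
        congr 1
        rw [PySem.Int.floordiv_eq_iff_of_pos (by exact_mod_cast hK)]
        have htK : (t : Int) < (K : Int) := by exact_mod_cast List.mem_range.mp ht
        constructor <;> nlinarith
      rw [List.map_congr_left hconst]
      simp
    rw [hsplit, List.map_append, htail, ih]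
    push_cast
    rw [hsplit2, List.flatMap_append]
    simp

-- 'for _ in range(K): acc.append(c)' appends K copies of c.
lemma foldl_append_const {α : Type} (c : α) (l : List Int) (init : List α) :
    l.foldl (fun t _ => t ++ [c]) init = init ++ List.replicate l.length c := by
  induction l generalizing init with
  | nil => simp
  | cons x xs ih =>
    rw [List.foldl_cons, ih, List.append_assoc]
    simp [List.replicate_succ]

lemma homothety_eq (square : List (List Int)) (k : Int) :
    homothety_square square k = homothety_square_alt square k := by
  rcases le_or_gt k 0 with hk | hk
  · have h0 : (square.length : Int) * k ≤ 0 := by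
      have hn : (0 : Int) ≤ (square.length : Int) := by positivity
      exact mul_nonpos_of_nonneg_of_nonpos hn hk
    simp [homothety_square, homothety_square_alt,
      PySem.List.pyRange_one_eq_nil hk, PySem.List.pyRange_one_eq_nil h0,
      List.foldl_fixed]
  · obtain ⟨K, rfl⟩ : ∃ K : Nat, k = (K : Int) := ⟨k.toNat, (Int.toNat_of_nonneg hk.le).symm⟩
    have hK : 0 < K := by exact_mod_cast hk
    have hlen : (PySem.List.pyRange 0 (K : Int) 1).length = K := by
      simp [PySem.List.length_pyRange_one]
    -- rewrite A into flatMap-of-replicate form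
    have hA : homothety_square square (K : Int)
        = (PySem.List.pyRange 0 (square.length : Int) 1).flatMap (fun i =>
            List.replicate K ((PySem.List.pyRange 0 (square.length : Int) 1).flatMap (fun j =>
              List.replicate K (PySem.List.pyGetD (PySem.List.pyGetD square i []) j 0)))) := by
      unfold homothety_square
      have hinner : ∀ i : Int, (PySem.List.pyRange 0 (square.length : Int) 1).foldl
            (fun temp_arr j => (PySem.List.pyRange 0 (K : Int) 1).foldl (fun t _ =>
              t ++ [PySem.List.pyGetD (PySem.List.pyGetD square i []) j 0]) temp_arr) []
          = (PySem.List.pyRange 0 (square.length : Int) 1).flatMap (fun j =>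
              List.replicate K (PySem.List.pyGetD (PySem.List.pyGetD square i []) j 0)) := by
        intro i
        rw [show (fun temp_arr j => (PySem.List.pyRange 0 (K : Int) 1).foldl (fun t _ =>
              t ++ [PySem.List.pyGetD (PySem.List.pyGetD square i []) j 0]) temp_arr)
            = fun temp_arr j => temp_arr ++ List.replicate K
                (PySem.List.pyGetD (PySem.List.pyGetD square i []) j 0) from
          funext fun temp_arr => funext fun j => by rw [foldl_append_const, hlen]]
        rw [PySem.List.foldl_append_eq_flatMap]
        simp only [List.nil_append]
      simp only [hinner]
      rw [show (fun (new_square : List (List Int)) (i : Int) =>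
            (PySem.List.pyRange 0 (K : Int) 1).foldl (fun ns _ => ns ++
              [(PySem.List.pyRange 0 (square.length : Int) 1).flatMap (fun j =>
                List.replicate K (PySem.List.pyGetD (PySem.List.pyGetD square i []) j 0))]) new_square)
          = fun new_square i => new_square ++ List.replicate K
              ((PySem.List.pyRange 0 (square.length : Int) 1).flatMap (fun j =>
                List.replicate K (PySem.List.pyGetD (PySem.List.pyGetD square i []) j 0))) from
        funext fun ns => funext fun i => by rw [foldl_append_const, hlen]]
      rw [PySem.List.foldl_append_eq_flatMap]
      simp only [List.nil_append]
    have hB : homothety_square_alt square (K : Int)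
        = (PySem.List.pyRange 0 (square.length : Int) 1).flatMap (fun i =>
            List.replicate K ((PySem.List.pyRange 0 ((square.length : Int) * (K : Int)) 1).map
              (fun j => PySem.List.pyGetD (PySem.List.pyGetD square i [])
                (PySem.Int.floordiv j (K : Int)) 0))) :=
      map_floordiv_pyRange_eq_flatMap K hK square.length
        (fun x => (PySem.List.pyRange 0 ((square.length : Int) * (K : Int)) 1).map
          (fun j => PySem.List.pyGetD (PySem.List.pyGetD square x [])
            (PySem.Int.floordiv j (K : Int)) 0))
    have hfun : (fun i => List.replicate K ((PySem.List.pyRange 0 (square.length : Int) 1).flatMap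
            (fun j => List.replicate K (PySem.List.pyGetD (PySem.List.pyGetD square i []) j 0))))
        = (fun i => List.replicate K ((PySem.List.pyRange 0 ((square.length : Int) * (K : Int)) 1).map
            (fun j => PySem.List.pyGetD (PySem.List.pyGetD square i [])
              (PySem.Int.floordiv j (K : Int)) 0))) := by
      funext i
      exact congrArg (List.replicate K)
        (map_floordiv_pyRange_eq_flatMap K hK square.length
          (fun x => PySem.List.pyGetD (PySem.List.pyGetD square i []) x 0)).symm
    rw [hA, hfun, ← hB]

-- ===== VERDICT (by name: the statement is the Claim_ definition above) =====
theorem homothety_square_spec : Claim_equal_homothety_square := by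
  intro square k _ _
  unfold Spec_homothety_square
  exact homothety_eq square k
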